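-- pv_equiv track=rewrite | github.com/parkcoool/Algorithm | 프로그래머스/2/87946. 피로도/피로도.py | solution
-- ===== SOURCE A (Python) =====
-- from itertools import permutations
--
-- def solution(k, dungeons):
--     ans = 0
--     for order in permutations(range(len(dungeons))):
--         energy = k
--         count = 0
--         while count < len(dungeons) and energy > 0:
--             dungeon = dungeons[order[count]]
--             if energy < dungeon[0]: break
--             energy -= dungeon[1]
--             count += 1
--         ans = max(ans, count)
--     return ans
-- ===== SOURCE B (Python) =====
-- def solution(k, dungeons):
--     def dfs(energy, remaining):
--         best = 0
--         if energy > 0: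
--             for j, i in enumerate(remaining):
--                 if dungeons[i][0] <= energy:
--                     best = max(best, 1 + dfs(energy - dungeons[i][1], remaining[:j] + remaining[j + 1:]))
--         return best
--     return dfs(k, list(range(len(dungeons))))
-- ===== Notes on version B (the rewrite author's own statement) =====
-- stated objective: alternative
-- what changed: A enumerates all n! index orderings with itertools.permutations and replays each one from scratch; B is a recursive backtracking search over the list of remaining dungeons that extends only feasible prefixes (and prunes whole subtrees as soon as energy runs out or no dungeon is clearable).
-- outside the precondition, e.g. on solution(5, [[9]]): A returns 0, B returns 0; on solution(5, [[1]]): A raises IndexError, B raises IndexError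
import Mathlib
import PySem

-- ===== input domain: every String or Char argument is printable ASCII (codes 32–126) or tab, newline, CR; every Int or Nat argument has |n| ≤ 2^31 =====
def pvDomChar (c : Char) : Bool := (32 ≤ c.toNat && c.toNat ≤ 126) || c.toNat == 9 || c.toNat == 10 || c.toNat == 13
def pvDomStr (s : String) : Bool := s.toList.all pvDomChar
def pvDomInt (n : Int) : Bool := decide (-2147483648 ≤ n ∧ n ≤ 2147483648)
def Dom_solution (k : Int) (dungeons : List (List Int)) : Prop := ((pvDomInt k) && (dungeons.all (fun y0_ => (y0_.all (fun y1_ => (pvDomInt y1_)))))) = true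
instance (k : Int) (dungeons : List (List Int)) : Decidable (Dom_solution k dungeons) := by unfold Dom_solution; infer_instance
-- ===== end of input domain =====

-- B replaces A's brute-force enumeration of all n! orderings (each replayed from scratch)
-- by a recursive backtracking search over the list of remaining dungeons; same return value (objective: alternative).

-- ===== PORT A =====

-- the body of A's `while` loop, as structural recursion on the not-yet-visited suffix of `order`
-- (Python's `count < len(dungeons)` is `count < len(order)` since each order is a permutation of
-- range(len(dungeons)); the returned Int is the final `count`).  Rows too short for `dungeon[0]` /
-- `dungeon[1]` raise IndexError in Python: Pre_solution excludes them, so `.getD`'s default is never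
-- the value used on admitted inputs.
def pyCount (dungeons : List (List Int)) : Int → List Int → Int
  | _, [] => 0
  | energy, i :: rest =>
    if energy > 0 then
      let d := (PySem.List.pyGet? dungeons i).getD []
      if energy < (PySem.List.pyGet? d 0).getD 0 then 0
      else 1 + pyCount dungeons (energy - (PySem.List.pyGet? d 1).getD 0) rest
    else 0

-- for order in permutations(range(len(dungeons))): ans = max(ans, count-of-that-order)
def solution (k : Int) (dungeons : List (List Int)) : Int :=
  let idxs := PySem.List.pyRange 0 (PySem.List.len dungeons) 1
  (PySem.List.permutations idxs idxs.length).foldl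
    (fun ans order => max ans (pyCount dungeons k order)) 0

-- ===== PORT B =====

-- dfs(energy, remaining): fuel = |remaining| makes the recursion structural (a totality guard only;
-- it never runs out on the calls made); the `for j, i in enumerate(remaining)` loop is a foldl over
-- `enumerate`, and the slices remaining[:j] + remaining[j+1:] are PySem slices (j ≥ 0 always).
def dfsB (dungeons : List (List Int)) : Nat → Int → List Int → Int
  | 0, _, _ => 0
  | fuel + 1, energy, remaining =>
    if energy > 0 then
      (PySem.List.enumerate remaining).foldl
        (fun best ji =>
          let d := (PySem.List.pyGet? dungeons ji.2).getD []
          if (PySem.List.pyGet? d 0).getD 0 ≤ energy then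
            max best (1 + dfsB dungeons fuel (energy - (PySem.List.pyGet? d 1).getD 0)
              (PySem.List.slice remaining none (some ji.1) ++
               PySem.List.slice remaining (some (ji.1 + 1)) none))
          else best) 0
    else 0

def solution_alt (k : Int) (dungeons : List (List Int)) : Int :=
  dfsB dungeons dungeons.length k (PySem.List.pyRange 0 (PySem.List.len dungeons) 1)

-- ===== PRECONDITION & SPEC =====
-- Pre_ excludes inputs where k > 0 and some dungeon row has fewer than 2 entries: there A (and B)
-- can hit `dungeon[0]` / `dungeon[1]` and raise IndexError (on a few such inputs the short row is
-- never consulted and A still returns; see claim.json cites).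
def Pre_solution (k : Int) (dungeons : List (List Int)) : Prop :=
  0 < k → ∀ d ∈ dungeons, 2 ≤ d.length
instance (k : Int) (dungeons : List (List Int)) : Decidable (Pre_solution k dungeons) := by
  unfold Pre_solution; infer_instance

def pvWitness_solution : Int × List (List Int) := (80, [[80, 20], [50, 40], [30, 10]])

def Spec_solution (k : Int) (dungeons : List (List Int)) (out : Int) : Prop := out = solution_alt k dungeons
instance (k : Int) (dungeons : List (List Int)) (out : Int) : Decidable (Spec_solution k dungeons out) := by unfold Spec_solution; infer_instance

-- ===== CLAIM (what is proved, stated in full; the proofs are below) =====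
def Claim_equal_solution : Prop := ∀ (k : Int) (dungeons : List (List Int)), Dom_solution k dungeons → Pre_solution k dungeons → Spec_solution k dungeons (solution k dungeons)

-- ===== LEMMAS AND PROOFS =====

-- pulling a `max c ·` out of a running-max fold
theorem foldl_max_out {α : Type} (f : α → Int) (L : List α) (c acc : Int) :
    L.foldl (fun a x => max a (f x)) (max c acc) = max c (L.foldl (fun a x => max a (f x)) acc) := by
  induction L generalizing acc with
  | nil => rfl
  | cons x t ih => simpa [max_assoc] using ih (max acc (f x))

-- a running-max fold of a nonnegative projection over a nonempty list, arbitrary init b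
theorem foldl_max_nonempty {α : Type} (f : α → Int) (x : α) (t : List α) (b : Int)
    (hf : ∀ y ∈ x :: t, 0 ≤ f y) :
    (x :: t).foldl (fun a y => max a (f y)) b = max b ((x :: t).foldl (fun a y => max a (f y)) 0) := by
  have h0 : (0 : Int) ≤ f x := hf x (by simp)
  have hle : f x ≤ t.foldl (fun a y => max a (f y)) (f x) :=
    (PySem.List.le_foldl_max_int t f (f x)).1
  simp only [List.foldl_cons]
  rw [foldl_max_out f t b (f x), foldl_max_out f t 0 (f x),
      max_eq_right (le_trans h0 hle)]

-- a running-max fold where every projected value is 0 keeps `max acc 0`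
theorem foldl_max_zero {α : Type} (L : List α) (acc : Int) :
    L.foldl (fun a (_ : α) => max a 0) acc = if L = [] then acc else max acc 0 := by
  induction L generalizing acc with
  | nil => rfl
  | cons x t ih => simp only [List.foldl_cons, ih]; split <;> simp

-- shifting a constant through a running-max fold
theorem foldl_max_shift {α : Type} (f : α → Int) (L : List α) (acc : Int) :
    L.foldl (fun a x => max a (1 + f x)) acc = 1 + L.foldl (fun a x => max a (f x)) (acc - 1) := by
  induction L generalizing acc with
  | nil => simp only [List.foldl_nil]; omega
  | cons x t ih =>
    simp only [List.foldl_cons]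
    rw [ih]
    congr 1
    rw [show max acc (1 + f x) - 1 = max (acc - 1) (1 + f x - 1) from (max_sub_sub_right acc (1 + f x) 1).symm]
    congr 1
    omega

-- permutations of a list of the right length is never []
theorem permutations_ne_nil (s : List Int) (r : Nat) (h : s.length = r) :
    PySem.List.permutations s r ≠ [] := by
  induction r generalizing s with
  | zero => rw [PySem.List.permutations]; simp
  | succ r ih =>
    rw [PySem.List.permutations]
    match s, h with
    | x :: t, h =>
      intro hnil
      have h1 := List.flatMap_eq_nil_iff.mp hnil 0 (List.mem_range.mpr (by simp))
      simp only [List.getElem?_cons_zero, List.eraseIdx_cons_zero] at h1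
      exact ih t (by simpa using h) (by simpa using h1)

-- dfsB is nonnegative
theorem dfsB_nonneg (dungeons : List (List Int)) (fuel : Nat) (e : Int) (s : List Int) :
    0 ≤ dfsB dungeons fuel e s := by
  cases fuel with
  | zero => simp [dfsB]
  | succ fuel =>
    rw [dfsB]
    split
    · have : ∀ (L : List (Int × Int)) (a : Int), 0 ≤ a →
          0 ≤ L.foldl (fun best ji =>
            let d := (PySem.List.pyGet? dungeons ji.2).getD []
            if (PySem.List.pyGet? d 0).getD 0 ≤ e then
              max best (1 + dfsB dungeons fuel (e - (PySem.List.pyGet? d 1).getD 0)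
                (PySem.List.slice s none (some ji.1) ++ PySem.List.slice s (some (ji.1 + 1)) none))
            else best) a := by
        intro L
        induction L with
        | nil => intro a ha; simpa using ha
        | cons p t iht =>
          intro a ha
          simp only [List.foldl_cons]
          apply iht
          dsimp only
          split
          · exact le_trans ha (le_max_left _ _)
          · exact ha
      exact this _ 0 le_rfl
    · exact le_rfl

-- the generic fold comparison: running max of (if P then w else 0) from b, versus
-- B's loop shape (if P then max a w else a) from 0, over the same nonempty list
theorem fold_max_eq_fold_if (P : Nat → Prop) [DecidablePred P] (w : Nat → Int)
    (x : Nat) (t : List Nat) (b : Int) (hw : ∀ j, 0 ≤ w j) :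
    (x :: t).foldl (fun a j => max a (if P j then w j else 0)) b
      = max b ((x :: t).foldl (fun a j => if P j then max a (w j) else a) 0) := by
  have hsame : ∀ (L : List Nat) (a : Int), 0 ≤ a →
      L.foldl (fun a j => max a (if P j then w j else 0)) a
        = L.foldl (fun a j => if P j then max a (w j) else a) a := by
    intro L
    induction L with
    | nil => intro a _; rfl
    | cons y u ihu =>
      intro a ha
      simp only [List.foldl_cons]
      by_cases hy : P y
      · rw [if_pos hy, if_pos hy]
        exact ihu _ (le_trans ha (le_max_left _ _))
      · rw [if_neg hy, if_neg hy, max_eq_left ha]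
        exact ihu a ha
  rw [foldl_max_nonempty (fun j => if P j then w j else 0) x t b
      (by intro y _; dsimp only; split; exacts [hw y, le_rfl])]
  rw [hsame (x :: t) 0 le_rfl]

-- THE MAIN INVARIANT: the running max of pyCount over all permutations of an index list s
-- (|s| = fuel), started at b, equals max b (dfsB fuel e s).
theorem perms_fold_eq_dfsB (dungeons : List (List Int)) (fuel : Nat) (s : List Int) (e b : Int)
    (hlen : s.length = fuel) :
    (PySem.List.permutations s fuel).foldl (fun a o => max a (pyCount dungeons e o)) b
      = max b (dfsB dungeons fuel e s) := by
  induction fuel generalizing s e b with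
  | zero =>
    rw [PySem.List.permutations, dfsB]
    simp [pyCount]
  | succ fuel ih =>
    set req : Int → Int := fun i =>
      (PySem.List.pyGet? ((PySem.List.pyGet? dungeons i).getD []) 0).getD 0 with hreq
    set cost : Int → Int := fun i =>
      (PySem.List.pyGet? ((PySem.List.pyGet? dungeons i).getD []) 1).getD 0 with hcost
    -- the contribution of clearing dungeon s[j] first
    set c : Nat → Int := fun j =>
      if 0 < e ∧ req (s.getD j 0) ≤ e then
        1 + dfsB dungeons fuel (e - cost (s.getD j 0)) (s.eraseIdx j)
      else 0 with hc
    have hc_nonneg : ∀ j, 0 ≤ c j := by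
      intro j; rw [hc]; dsimp only; split
      · have := dfsB_nonneg dungeons fuel (e - cost (s.getD j 0)) (s.eraseIdx j); omega
      · exact le_rfl
    -- Step 1: the A-side fold is the range fold of the running max of c
    have hA : (PySem.List.permutations s (fuel + 1)).foldl (fun a o => max a (pyCount dungeons e o)) b
        = (List.range s.length).foldl (fun a j => max a (c j)) b := by
      rw [PySem.List.permutations, List.foldl_flatMap]
      apply PySem.List.foldl_congr_mem
      intro acc j hj
      have hjlt : j < s.length := List.mem_range.mp hj
      have hget : s[j]? = some s[j] := List.getElem?_eq_getElem hjlt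
      have hgetD : s.getD j 0 = s[j] := List.getD_eq_getElem s 0 hjlt
      have herase : (s.eraseIdx j).length = fuel := by
        rw [List.length_eraseIdx_of_lt hjlt]; omega
      simp only [hget]
      rw [List.foldl_map]
      have hcount : ∀ o : List Int, pyCount dungeons e (s[j] :: o)
          = if 0 < e then (if e < req s[j] then 0 else 1 + pyCount dungeons (e - cost s[j]) o) else 0 := by
        intro o; rw [pyCount, hreq, hcost]
      by_cases he : 0 < e
      · by_cases hr : req s[j] ≤ e
        · -- clearable: shift the +1 out and use the IH
          have hstep : ∀ o : List Int, pyCount dungeons e (s[j] :: o) = 1 + pyCount dungeons (e - cost s[j]) o := by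
            intro o; rw [hcount]; rw [if_pos he, if_neg (not_lt.mpr hr)]
          calc (PySem.List.permutations (s.eraseIdx j) fuel).foldl
                  (fun a o => max a (pyCount dungeons e (s[j] :: o))) acc
              = (PySem.List.permutations (s.eraseIdx j) fuel).foldl
                  (fun a o => max a (1 + pyCount dungeons (e - cost s[j]) o)) acc := by
                apply PySem.List.foldl_congr_mem; intro a o _; rw [hstep o]
            _ = 1 + (PySem.List.permutations (s.eraseIdx j) fuel).foldl
                  (fun a o => max a (pyCount dungeons (e - cost s[j]) o)) (acc - 1) := by
                rw [foldl_max_shift]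
            _ = 1 + max (acc - 1) (dfsB dungeons fuel (e - cost s[j]) (s.eraseIdx j)) := by
                rw [ih (s.eraseIdx j) _ _ herase]
            _ = max acc (c j) := by
                rw [hc]; dsimp only; rw [hgetD, if_pos ⟨he, hr⟩]; omega
        · -- first dungeon not clearable: every order starting with it counts 0
          have hz : ∀ o : List Int, pyCount dungeons e (s[j] :: o) = 0 := by
            intro o; rw [hcount]; rw [if_pos he, if_pos (not_le.mp hr)]
          have hcj : c j = 0 := by rw [hc]; dsimp only; rw [hgetD, if_neg (by tauto)]
          match hP : PySem.List.permutations (s.eraseIdx j) fuel, permutations_ne_nil _ _ herase with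
          | p :: ps, _ =>
            calc (p :: ps).foldl (fun a o => max a (pyCount dungeons e (s[j] :: o))) acc
                = (p :: ps).foldl (fun a (_ : List Int) => max a 0) acc := by
                  apply PySem.List.foldl_congr_mem; intro a o _; rw [hz o]
              _ = max acc 0 := by rw [foldl_max_zero]; simp
              _ = max acc (c j) := by rw [hcj]
      · -- no energy at all
        have hz : ∀ o : List Int, pyCount dungeons e (s[j] :: o) = 0 := by
          intro o; rw [hcount]; rw [if_neg he]
        have hcj : c j = 0 := by rw [hc]; dsimp only; rw [if_neg (by tauto)]
        match hP : PySem.List.permutations (s.eraseIdx j) fuel, permutations_ne_nil _ _ herase with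
        | p :: ps, _ =>
          calc (p :: ps).foldl (fun a o => max a (pyCount dungeons e (s[j] :: o))) acc
              = (p :: ps).foldl (fun a (_ : List Int) => max a 0) acc := by
                apply PySem.List.foldl_congr_mem; intro a o _; rw [hz o]
            _ = max acc 0 := by rw [foldl_max_zero]; simp
            _ = max acc (c j) := by rw [hcj]
    rw [hA, dfsB]
    -- Step 2: the B-side loop over `enumerate` is the same range fold
    obtain ⟨x, t, hxt⟩ : ∃ x t, List.range s.length = x :: t := by
      rw [hlen, List.range_succ_eq_map]; exact ⟨0, _, rfl⟩
    by_cases he : 0 < e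
    · rw [if_pos he]
      have hB : (PySem.List.enumerate s).foldl
          (fun best ji =>
            let d := (PySem.List.pyGet? dungeons ji.2).getD []
            if (PySem.List.pyGet? d 0).getD 0 ≤ e then
              max best (1 + dfsB dungeons fuel (e - (PySem.List.pyGet? d 1).getD 0)
                (PySem.List.slice s none (some ji.1) ++ PySem.List.slice s (some (ji.1 + 1)) none))
            else best) 0
          = (List.range s.length).foldl
              (fun a j => if req (s.getD j 0) ≤ e then
                  max a (1 + dfsB dungeons fuel (e - cost (s.getD j 0)) (s.eraseIdx j))
                else a) 0 := by
        rw [PySem.List.enumerate_eq_map_pyRange s 0, PySem.List.len_eq, PySem.List.pyRange_zero_nat,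
            List.foldl_map, List.foldl_map]
        apply PySem.List.foldl_congr_mem
        intro a j hj
        have hjlt : j < s.length := List.mem_range.mp hj
        dsimp only
        rw [PySem.List.pyGetD_natCast]
        rw [PySem.List.slice_to_natCast]
        rw [show ((j : Int) + 1) = ((j + 1 : Nat) : Int) from by push_cast; ring,
            PySem.List.slice_from_natCast]
        rw [← List.eraseIdx_eq_take_drop_succ]
      rw [hB]
      have hcform : ∀ j, c j = if req (s.getD j 0) ≤ e then
          1 + dfsB dungeons fuel (e - cost (s.getD j 0)) (s.eraseIdx j) else 0 := by
        intro j; rw [hc]; dsimp only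
        by_cases hr : req (s.getD j 0) ≤ e
        · rw [if_pos ⟨he, hr⟩, if_pos hr]
        · rw [if_neg (by tauto), if_neg hr]
      rw [hxt]
      calc (x :: t).foldl (fun a j => max a (c j)) b
          = (x :: t).foldl (fun a j => max a (if req (s.getD j 0) ≤ e then
              1 + dfsB dungeons fuel (e - cost (s.getD j 0)) (s.eraseIdx j) else 0)) b := by
            apply PySem.List.foldl_congr_mem; intro a j _; rw [hcform j]
        _ = max b ((x :: t).foldl (fun a j => if req (s.getD j 0) ≤ e then
              max a (1 + dfsB dungeons fuel (e - cost (s.getD j 0)) (s.eraseIdx j)) else a) 0) := by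
            apply fold_max_eq_fold_if
            intro j
            have := dfsB_nonneg dungeons fuel (e - cost (s.getD j 0)) (s.eraseIdx j)
            omega
    · rw [if_neg he]
      have hz : ∀ j, c j = 0 := by
        intro j; rw [hc]; dsimp only; rw [if_neg (by tauto)]
      rw [hxt]
      calc (x :: t).foldl (fun a j => max a (c j)) b
          = (x :: t).foldl (fun a (_ : Nat) => max a 0) b := by
            apply PySem.List.foldl_congr_mem; intro a j _; rw [hz j]
        _ = max b 0 := by rw [foldl_max_zero]; simp

-- ===== VERDICT (by name: the statement is the Claim_ definition above) =====
theorem solution_spec : Claim_equal_solution := by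
  intro k dungeons _ _
  show solution k dungeons = solution_alt k dungeons
  unfold solution solution_alt
  have hlen : (PySem.List.pyRange 0 (PySem.List.len dungeons) 1).length = dungeons.length := by
    rw [PySem.List.len_eq, PySem.List.length_pyRange_one]
    omega
  rw [perms_fold_eq_dfsB dungeons _ _ k 0 rfl, hlen,
      max_eq_right (dfsB_nonneg dungeons dungeons.length k _)]
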